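-- pv_equiv track=rewrite | github.com/Ansh318/GCC-UBS | solutions/mlmm_Program.py | count_bow
-- ===== SOURCE A (Python) =====
-- def count_bow(scores, num_scores, cutoff):
--     count = 0
--     for i in range(0, num_scores):
--         sum = 0;
--         for j in range(i, num_scores):
--             # If sum is less than k
--             # then update sum and
--             # increment count
--             if (sum + scores[j] < cutoff):
--                 sum = scores[j] + sum
--                 count += 1
--             else:
--                 break
--     return count
-- ===== SOURCE B (Python) =====
-- def count_bow(scores, num_scores, cutoff):
--     # Column-wise single pass: instead of rescanning from every start, keep the
--     # running sums of all still-alive starts, extend them by each new score,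
--     # open a new start, drop the sums that reached the cutoff, and add the
--     # number of survivors to the count.
--     count = 0
--     alive = []
--     for x in scores[:max(num_scores, 0)]:
--         alive = [r + x for r in alive]
--         alive.append(x)
--         alive = [r for r in alive if r < cutoff]
--         count += len(alive)
--     return count
-- ===== Notes on version B (the rewrite author's own statement) =====
-- stated objective: alternative
-- what changed: A's row-wise nested rescan (restart the cumulative sum at every start index) is replaced by one left-to-right pass that maintains the running sums of all still-alive starts and counts survivors per position.
import Mathlib
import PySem

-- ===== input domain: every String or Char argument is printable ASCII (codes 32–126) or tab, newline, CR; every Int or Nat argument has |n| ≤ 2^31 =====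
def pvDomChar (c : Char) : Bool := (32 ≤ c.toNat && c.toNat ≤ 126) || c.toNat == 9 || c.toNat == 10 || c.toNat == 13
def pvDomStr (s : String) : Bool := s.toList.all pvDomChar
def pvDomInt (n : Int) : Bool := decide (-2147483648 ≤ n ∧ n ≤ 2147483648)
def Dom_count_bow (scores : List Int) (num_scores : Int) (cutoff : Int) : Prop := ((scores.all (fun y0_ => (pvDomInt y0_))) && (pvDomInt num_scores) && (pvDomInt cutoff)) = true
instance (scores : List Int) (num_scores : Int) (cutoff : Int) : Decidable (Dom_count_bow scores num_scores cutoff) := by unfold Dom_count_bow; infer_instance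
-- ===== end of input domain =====

-- B replaces A's row-wise rescan from every start by one left-to-right pass
-- maintaining the running sums of all still-alive starts (alternative algorithm).

-- ===== PORT A =====
-- inner 'for j in range(i, num_scores)' loop with its break; 'none' from pyGet?
-- is Python's IndexError, excluded by Pre_count_bow.
def pvInnerA (scores : List Int) (cutoff : Int) : List Int → Int → Int → Int
  | [], _, count => count
  | j :: js, sum, count =>
    match PySem.List.pyGet? scores j with
    | none => count
    | some v =>
      if sum + v < cutoff then pvInnerA scores cutoff js (v + sum) (count + 1)
      else count

def count_bow (scores : List Int) (num_scores : Int) (cutoff : Int) : Int :=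
  (PySem.List.pyRange 0 num_scores 1).foldl
    (fun count i => pvInnerA scores cutoff (PySem.List.pyRange i num_scores 1) 0 count) 0

-- ===== PORT B =====
-- one iteration of B's loop body: extend every alive running sum, open a new
-- start, keep the sums still below the cutoff, add the survivor count.
def pvStepB (cutoff : Int) (st : List Int × Int) (x : Int) : List Int × Int :=
  let alive := (st.1.map (fun r => r + x)) ++ [x]
  let alive := alive.filter (fun r => decide (r < cutoff))
  (alive, st.2 + (alive.length : Int))

def count_bow_alt (scores : List Int) (num_scores : Int) (cutoff : Int) : Int :=
  ((PySem.List.slice scores none (some (max num_scores 0))).foldl (pvStepB cutoff) ([], 0)).2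

-- ===== PRECONDITION & SPEC =====
-- A raises IndexError (scores[j]) exactly when num_scores > len(scores).
def Pre_count_bow (scores : List Int) (num_scores : Int) (cutoff : Int) : Prop :=
  num_scores ≤ (scores.length : Int)
instance (scores : List Int) (num_scores : Int) (cutoff : Int) : Decidable (Pre_count_bow scores num_scores cutoff) := by unfold Pre_count_bow; infer_instance

def pvWitness_count_bow : List Int × Int × Int := ([1, 2, 3], 3, 4)

def Spec_count_bow (scores : List Int) (num_scores : Int) (cutoff : Int) (out : Int) : Prop := out = count_bow_alt scores num_scores cutoff
instance (scores : List Int) (num_scores : Int) (cutoff : Int) (out : Int) : Decidable (Spec_count_bow scores num_scores cutoff out) := by unfold Spec_count_bow; infer_instance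

-- ===== CLAIM (what is proved, stated in full; the proofs are below) =====
def Claim_equal_count_bow : Prop := ∀ (scores : List Int) (num_scores : Int) (cutoff : Int), Dom_count_bow scores num_scores cutoff → Pre_count_bow scores num_scores cutoff → Spec_count_bow scores num_scores cutoff (count_bow scores num_scores cutoff)
-- ===== LEMMAS AND PROOFS =====

-- A's inner loop as a structural recursion on the remaining scores:
-- pvF c xs acc = number of further scores consumed before the running sum reaches c.
def pvF (cutoff : Int) : List Int → Int → Int
  | [], _ => 0
  | x :: xs, acc => if acc + x < cutoff then 1 + pvF cutoff xs (acc + x) else 0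

-- A's whole double loop, row by row.
def pvArow (cutoff : Int) : List Int → Int
  | [] => 0
  | x :: xs => pvF cutoff (x :: xs) 0 + pvArow cutoff xs

theorem pvInnerA_eq (scores : List Int) (cutoff num : Int) (hnum : num ≤ (scores.length : Int)) :
    ∀ (k : Nat) (i acc c : Int), 0 ≤ i → (num - i).toNat = k →
      pvInnerA scores cutoff (PySem.List.pyRange i num 1) acc c =
        c + pvF cutoff ((scores.take num.toNat).drop i.toNat) acc := by
  intro k
  induction k with
  | zero =>
    intro i acc c hi hk
    have hni : num ≤ i := by omega
    have hr : PySem.List.pyRange i num 1 = [] := by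
      rw [PySem.List.pyRange_one]
      have : (num - i).toNat = 0 := hk
      simp [this]
    have hd : ((scores.take num.toNat).drop i.toNat) = [] := by
      apply List.drop_eq_nil_of_le
      simp
      omega
    rw [hr, hd]
    simp [pvInnerA, pvF]
  | succ k ih =>
    intro i acc c hi hk
    have hlt : i < num := by omega
    have hilen : i.toNat < scores.length := by omega
    have hcons : PySem.List.pyRange i num 1 = i :: PySem.List.pyRange (i+1) num 1 :=
      PySem.List.pyRange_one_cons hlt
    have hget : PySem.List.pyGet? scores i = some scores[i.toNat] :=
      PySem.List.pyGet?_eq_some_getElem scores hi (by omega)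
    have hdrop : (scores.take num.toNat).drop i.toNat =
        scores[i.toNat] :: (scores.take num.toNat).drop (i.toNat + 1) := by
      have hl : i.toNat < (scores.take num.toNat).length := by simp; omega
      rw [List.drop_eq_getElem_cons hl]
      congr 1
      simp [List.getElem_take]
    rw [hcons, hdrop]
    simp only [pvInnerA, hget, pvF]
    by_cases hc : acc + scores[i.toNat] < cutoff
    · simp only [if_pos hc]
      have h1 : ((i + 1).toNat : Nat) = i.toNat + 1 := by omega
      have := ih (i + 1) (acc + scores[i.toNat]) (c + 1) (by omega) (by omega)
      rw [h1] at this
      rw [show scores[i.toNat] + acc = acc + scores[i.toNat] by ring, this]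
      ring
    · simp only [if_neg hc]
      ring_nf

theorem pvOuter_eq (scores : List Int) (cutoff num : Int) (hnum : num ≤ (scores.length : Int)) :
    ∀ (k : Nat) (i c : Int), 0 ≤ i → (num - i).toNat = k →
      (PySem.List.pyRange i num 1).foldl
        (fun count j => pvInnerA scores cutoff (PySem.List.pyRange j num 1) 0 count) c =
        c + pvArow cutoff ((scores.take num.toNat).drop i.toNat) := by
  intro k
  induction k with
  | zero =>
    intro i c hi hk
    have hr : PySem.List.pyRange i num 1 = [] := by
      rw [PySem.List.pyRange_one]; simp [hk]
    have hd : ((scores.take num.toNat).drop i.toNat) = [] := by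
      apply List.drop_eq_nil_of_le; simp; omega
    rw [hr, hd]; simp [pvArow]
  | succ k ih =>
    intro i c hi hk
    have hlt : i < num := by omega
    have hcons : PySem.List.pyRange i num 1 = i :: PySem.List.pyRange (i+1) num 1 :=
      PySem.List.pyRange_one_cons hlt
    have hdrop : (scores.take num.toNat).drop i.toNat =
        scores[i.toNat] :: (scores.take num.toNat).drop (i.toNat + 1) := by
      have hl : i.toNat < (scores.take num.toNat).length := by simp; omega
      rw [List.drop_eq_getElem_cons hl]
      congr 1
      simp [List.getElem_take]
    rw [hcons]
    simp only [List.foldl_cons]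
    rw [pvInnerA_eq scores cutoff num hnum (num - i).toNat i 0 c hi rfl]
    have h1 : ((i + 1).toNat : Nat) = i.toNat + 1 := by omega
    have := ih (i + 1) (c + pvF cutoff ((scores.take num.toNat).drop i.toNat) 0) (by omega) (by omega)
    rw [h1] at this
    rw [this, hdrop]
    simp only [pvArow]
    rw [← hdrop]
    ring

-- the exchange step: extending + filtering the alive sums accounts exactly for
-- one more column of A's row-wise count.
theorem pvExchange (cutoff x : Int) (xs : List Int) :
    ∀ l : List Int,
      (((l.map (fun r => r + x)).filter (fun r => decide (r < cutoff))).length : Int) +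
        (((l.map (fun r => r + x)).filter (fun r => decide (r < cutoff))).map (pvF cutoff xs)).sum =
      (l.map (fun r => pvF cutoff (x :: xs) r)).sum := by
  intro l
  induction l with
  | nil => simp
  | cons r l ih =>
    rw [List.map_cons, List.filter_cons, List.map_cons, List.sum_cons]
    by_cases hc : r + x < cutoff
    · rw [if_pos (by simpa using hc)]
      rw [List.length_cons, List.map_cons, List.sum_cons]
      rw [show pvF cutoff (x :: xs) r = 1 + pvF cutoff xs (r + x) by simp [pvF, hc]]
      push_cast
      linarith [ih]
    · rw [if_neg (by simpa using hc)]
      rw [show pvF cutoff (x :: xs) r = 0 by simp [pvF, hc]]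
      linarith [ih]

theorem pvB_loop (cutoff : Int) :
    ∀ (xs al : List Int) (c : Int),
      (xs.foldl (pvStepB cutoff) (al, c)).2 =
        c + (al.map (fun r => pvF cutoff xs r)).sum + pvArow cutoff xs := by
  intro xs
  induction xs with
  | nil => intro al c; simp [pvF, pvArow]
  | cons x xs ih =>
    intro al c
    simp only [List.foldl_cons]
    rw [show pvStepB cutoff (al, c) x =
      (((al.map (fun r => r + x)) ++ [x]).filter (fun r => decide (r < cutoff)),
        c + ((((al.map (fun r => r + x)) ++ [x]).filter (fun r => decide (r < cutoff))).length : Int))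
      from rfl]
    rw [ih]
    simp only [List.filter_append, List.length_append, List.map_append, List.sum_append]
    have hx : ([x].filter (fun r => decide (r < cutoff))) = if x < cutoff then [x] else [] := by
      by_cases hc : x < cutoff <;> simp [List.filter, hc]
    have hsingle : (([x].filter (fun r => decide (r < cutoff))).length : Int) +
        (([x].filter (fun r => decide (r < cutoff))).map (pvF cutoff xs)).sum =
        pvF cutoff (x :: xs) 0 := by
      rw [hx]
      by_cases hc : x < cutoff <;> simp [pvF, hc]
    have hex := pvExchange cutoff x xs al
    simp only [List.map_cons, List.sum_cons, pvArow]
    push_cast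
    push_cast at hex hsingle
    linarith [hex, hsingle]

theorem pvA_eq (scores : List Int) (num_scores cutoff : Int)
    (h : num_scores ≤ (scores.length : Int)) :
    count_bow scores num_scores cutoff = pvArow cutoff (scores.take num_scores.toNat) := by
  unfold count_bow
  have := pvOuter_eq scores cutoff num_scores h num_scores.toNat 0 0 le_rfl (by omega)
  simpa using this

theorem pvB_eq (scores : List Int) (num_scores cutoff : Int) :
    count_bow_alt scores num_scores cutoff = pvArow cutoff (scores.take num_scores.toNat) := by
  unfold count_bow_alt
  have hs : PySem.List.slice scores none (some (max num_scores 0)) =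
      scores.take num_scores.toNat := by
    rw [PySem.List.slice_to scores (le_max_right _ _)]
    congr 1
    omega
  rw [hs, pvB_loop]
  simp

-- ===== VERDICT (by name: the statement is the Claim_ definition above) =====
theorem count_bow_spec : Claim_equal_count_bow := by
  intro scores num_scores cutoff _ hpre
  unfold Spec_count_bow
  rw [pvA_eq scores num_scores cutoff hpre, pvB_eq]
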